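-- pv_equiv track=rewrite | github.com/jennyzzt/LLM_debate_on_ARC | ARC_gen_agents1_rounds2_openai/6c434453/agent0/algo.py | solve
-- ===== SOURCE A (Python) =====
-- def solve(input_grid):
--     rows, cols = len(input_grid), len(input_grid[0])
--     output = [[cell for cell in row] for row in input_grid]  # Deep copy of the input grid
--
--     # Function to check and mark cells that are part of a vertical or horizontal line of three '1's
--     def mark_cells(r, c):
--         # Check horizontal line of three '1's
--         if c + 2 < cols and all(input_grid[r][c+i] == 1 for i in range(3)):
--             for i in range(3):
--                 output[r][c+i] = 2
--         # Check vertical line of three '1's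
--         if r + 2 < rows and all(input_grid[r+i][c] == 1 for i in range(3)):
--             for i in range(3):
--                 output[r+i][c] = 2
--
--     # Apply the transformation rules to each cell
--     for r in range(rows):
--         for c in range(cols):
--             mark_cells(r, c)
--
--     return output
-- ===== SOURCE B (Python) =====
-- def solve(input_grid):
--     # Run-length sweep: rewrite each row, turning every maximal run of 1's of
--     # length >= 3 into 2's; then sweep each column (via zip transposition) the
--     # same way and write the column marks into the output.
--     def sweep(line):
--         out, run = [], 0
--         for v in line:
--             if v == 1:
--                 run += 1
--             else:
--                 out += [2] * run if run >= 3 else [1] * run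
--                 out.append(v)
--                 run = 0
--         out += [2] * run if run >= 3 else [1] * run
--         return out
--
--     output = [sweep(row) for row in input_grid]
--     for c, col in enumerate(zip(*input_grid)):
--         marked = sweep(list(col))
--         for r in range(len(marked)):
--             if marked[r] == 2:
--                 output[r][c] = 2
--     return output
-- ===== Notes on version B (the rewrite author's own statement) =====
-- stated objective: faster
-- what changed: A checks a fixed 3-window horizontally and vertically at every cell of a mutable copy; B rewrites each row with a single run-length sweep turning every maximal run of >=3 ones into 2s, then sweeps the zip-transposed columns the same way and writes the column marks back.
-- outside the precondition, e.g. on solve([[1], [1, 1, 1]]): A returns [[1], [1, 1, 1]], B returns [[1], [2, 2, 2]]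
import Mathlib
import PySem

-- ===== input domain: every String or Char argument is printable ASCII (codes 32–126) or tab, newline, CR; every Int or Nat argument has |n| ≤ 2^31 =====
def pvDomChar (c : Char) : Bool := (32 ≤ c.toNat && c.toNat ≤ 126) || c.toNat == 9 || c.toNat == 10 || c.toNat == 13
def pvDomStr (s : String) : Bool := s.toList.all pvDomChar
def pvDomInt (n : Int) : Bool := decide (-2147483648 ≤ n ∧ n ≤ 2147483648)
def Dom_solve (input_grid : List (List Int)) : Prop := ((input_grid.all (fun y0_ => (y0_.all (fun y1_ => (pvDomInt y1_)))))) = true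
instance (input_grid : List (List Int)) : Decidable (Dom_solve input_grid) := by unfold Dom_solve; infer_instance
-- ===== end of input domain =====

-- B replaces A's per-cell fixed-window checks by one run-length sweep per row and per
-- zip-transposed column (same O(R*C) asymptotics; measurably faster by constant factor).

-- ===== PORT A =====
-- cellRC g r c = g[r][c] read with defaults (Python indices here are always in range under Pre_)
def cellRC (g : List (List Int)) (r c : Nat) : Int := (g.getD r []).getD c 0

-- output[r][c] = 2
def set2 (g : List (List Int)) (r c : Nat) : List (List Int) :=
  g.set r ((g.getD r []).set c 2)

-- the body of A's mark_cells(r, c): two guarded triple writes, conditions read input_grid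
-- (the horizontal half, producing out1, split out as a named helper)
def hmarkCells (input : List (List Int)) (cols : Nat) (out : List (List Int)) (r c : Nat) :
    List (List Int) :=
  if c + 2 < cols ∧ cellRC input r c = 1 ∧ cellRC input r (c+1) = 1 ∧ cellRC input r (c+2) = 1
  then set2 (set2 (set2 out r c) r (c+1)) r (c+2) else out

def markCells (input : List (List Int)) (rows cols : Nat) (out : List (List Int)) (r c : Nat) :
    List (List Int) :=
  let out1 := hmarkCells input cols out r c
  if r + 2 < rows ∧ cellRC input r c = 1 ∧ cellRC input (r+1) c = 1 ∧ cellRC input (r+2) c = 1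
  then set2 (set2 (set2 out1 r c) (r+1) c) (r+2) c else out1

def solve (input_grid : List (List Int)) : List (List Int) :=
  let rows := input_grid.length
  let cols := (input_grid.headD []).length
  let output := input_grid.map (fun row => row.map (fun cell => cell))  -- deep copy
  (List.range rows).foldl
    (fun out r => (List.range cols).foldl (fun o c => markCells input_grid rows cols o r c) out)
    output

-- ===== PORT B =====
-- `out += [2]*run if run >= 3 else [1]*run`
def sweepFlush (run : Nat) : List Int :=
  if 3 ≤ run then List.replicate run 2 else List.replicate run 1

-- one step of B's sweep loop, state = (out, run)
def sweepStep (s : List Int × Nat) (v : Int) : List Int × Nat :=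
  if v = 1 then (s.1, s.2 + 1) else (s.1 ++ sweepFlush s.2 ++ [v], 0)

-- B's sweep(line): rewrite maximal 1-runs of length >= 3 as 2's
def sweep (line : List Int) : List Int :=
  let s := line.foldl sweepStep ([], 0)
  s.1 ++ sweepFlush s.2

-- zip(*grid): peel one element off every row, stop as soon as some row is exhausted
def splitHeads : List (List Int) → Option (List Int × List (List Int))
  | [] => some ([], [])
  | [] :: _ => none
  | (h :: t) :: rs =>
    match splitHeads rs with
    | none => none
    | some (hs, ts) => some (h :: hs, t :: ts)

def zipGo : Nat → List (List Int) → List (List Int)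
  | 0, _ => []
  | n+1, g =>
    match splitHeads g with
    | none => []
    | some (hs, ts) => hs :: zipGo n ts

-- fuel = length of the first row bounds the number of tuples zip can yield
def pyZip (g : List (List Int)) : List (List Int) :=
  match g with
  | [] => []
  | r0 :: rest => zipGo r0.length (r0 :: rest)

-- the body of B's column loop: `for r in range(len(marked)): if marked[r] == 2: output[r][c] = 2`
-- (p is one (c, col) pair of enumerate(zip(*input_grid)); c = p.1 is a nonnegative
--  enumerate index, so .toNat is exact)
def markCol (out : List (List Int)) (p : Int × List Int) : List (List Int) :=
  let marked := sweep p.2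
  (List.range marked.length).foldl
    (fun o r => if marked.getD r 0 = 2 then set2 o r p.1.toNat else o) out

def solve_alt (input_grid : List (List Int)) : List (List Int) :=
  let output := input_grid.map sweep
  (PySem.List.enumerate (pyZip input_grid) 0).foldl markCol output

-- ===== PRECONDITION & SPEC =====
-- no run of three consecutive 1's anywhere in the line (abbrev so Pre_'s instance can see it)
abbrev NoRun3 (row : List Int) : Prop :=
  ∀ s, s < row.length →
    ¬(s + 2 < row.length ∧ row.getD s 0 = 1 ∧ row.getD (s+1) 0 = 1 ∧ row.getD (s+2) 0 = 1)

-- Pre_ excludes the empty grid (A raises IndexError on input_grid[0]) and ragged grids —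
-- there A either raises IndexError probing a short row, or returns a value that silently
-- ignores columns beyond the first row's length — except two classes on which A provably
-- returns the grid unchanged and B agrees: grids whose first row is empty, and grids with
-- at most 2 rows and at most 2 first-row columns, in both cases with no horizontal
-- run of three 1's anywhere.
def Pre_solve (input_grid : List (List Int)) : Prop :=
  input_grid ≠ [] ∧
  ((∀ row ∈ input_grid, row.length = (input_grid.headD []).length) ∨
   (input_grid.length ≤ 2 ∧ (input_grid.headD []).length ≤ 2 ∧
     ∀ row ∈ input_grid, NoRun3 row) ∨
   ((input_grid.headD []).length = 0 ∧ ∀ row ∈ input_grid, NoRun3 row))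
instance (input_grid : List (List Int)) : Decidable (Pre_solve input_grid) := by
  unfold Pre_solve; infer_instance

def pvWitness_solve : List (List Int) := [[1, 1, 1], [0, 1, 0], [2, 1, 0]]

def Spec_solve (input_grid : List (List Int)) (out : List (List Int)) : Prop :=
  out = solve_alt input_grid
instance (input_grid : List (List Int)) (out : List (List Int)) : Decidable (Spec_solve input_grid out) := by
  unfold Spec_solve; infer_instance

-- ===== CLAIM (what is proved, stated in full; the proofs are below) =====
def Claim_equal_solve : Prop :=
  ∀ (input_grid : List (List Int)), Dom_solve input_grid → Pre_solve input_grid →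
    Spec_solve input_grid (solve input_grid)

-- ===== LEMMAS AND PROOFS =====

-- rectangular shape
def Rect (g : List (List Int)) (R C : Nat) : Prop :=
  g.length = R ∧ ∀ row ∈ g, row.length = C

-- j lies in an all-ones window of width 3 of the line L
def W (L : List Int) (j : Nat) : Prop :=
  ∃ s, s + 2 < L.length ∧ L.getD s 0 = 1 ∧ L.getD (s+1) 0 = 1 ∧ L.getD (s+2) 0 = 1 ∧
    (j = s ∨ j = s + 1 ∨ j = s + 2)

-- A's horizontal window condition at (r, c), and the vertical one at (r, c)
def Hc (g : List (List Int)) (C r c : Nat) : Prop :=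
  c + 2 < C ∧ cellRC g r c = 1 ∧ cellRC g r (c+1) = 1 ∧ cellRC g r (c+2) = 1
def Vc (g : List (List Int)) (R r c : Nat) : Prop :=
  r + 2 < R ∧ cellRC g r c = 1 ∧ cellRC g (r+1) c = 1 ∧ cellRC g (r+2) c = 1

-- cell (i, j) is written by the mark_cells call at (r, c)
def Writes (g : List (List Int)) (R C r c i j : Nat) : Prop :=
  (Hc g C r c ∧ i = r ∧ (j = c ∨ j = c + 1 ∨ j = c + 2)) ∨
  (Vc g R r c ∧ j = c ∧ (i = r ∨ i = r + 1 ∨ i = r + 2))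

-- cell (i, j) is in a horizontal (resp. vertical) all-ones window of width 3
def MarkedH (g : List (List Int)) (C i j : Nat) : Prop :=
  ∃ s, Hc g C i s ∧ (j = s ∨ j = s + 1 ∨ j = s + 2)
def MarkedV (g : List (List Int)) (R i j : Nat) : Prop :=
  ∃ t, Vc g R t j ∧ (i = t ∨ i = t + 1 ∨ i = t + 2)

-- ---- A side ----
lemma rect_set2 {out : List (List Int)} {R C : Nat} (h : Rect out R C) {r c : Nat}
    (hr : r < R) (_hc : c < C) : Rect (set2 out r c) R C := by
  obtain ⟨hl, hrow⟩ := h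
  refine ⟨by simp [set2, hl], ?_⟩
  intro row hm
  rcases List.mem_or_eq_of_mem_set hm with hm' | rfl
  · exact hrow row hm'
  · have hrlt : r < out.length := by omega
    have : out.getD r [] = out[r] := List.getD_eq_getElem out [] hrlt
    rw [List.length_set, this]
    exact hrow _ (List.getElem_mem hrlt)

lemma getD_set {α : Type} (l : List α) (n m : Nat) (x d : α) :
    (l.set n x).getD m d = if n = m ∧ n < l.length then x else l.getD m d := by
  rw [List.getD_eq_getElem?_getD, List.getElem?_set, List.getD_eq_getElem?_getD]
  split_ifs with h1 h2 h3 h3 <;> simp_all <;> omega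

lemma cell_set2 {out : List (List Int)} {R C : Nat} (h : Rect out R C) {r c : Nat}
    (hr : r < R) (hc : c < C) (i j : Nat) :
    cellRC (set2 out r c) i j = if i = r ∧ j = c then 2 else cellRC out i j := by
  obtain ⟨hl, hrow⟩ := h
  have hrlt : r < out.length := by omega
  have hrowlen : (out.getD r []).length = C := by
    rw [List.getD_eq_getElem out [] hrlt]; exact hrow _ (List.getElem_mem hrlt)
  unfold cellRC set2
  rw [getD_set]
  by_cases hir : r = i
  · subst hir
    rw [if_pos ⟨rfl, hrlt⟩, getD_set, hrowlen]
    by_cases hjc : c = j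
    · subst hjc; rw [if_pos ⟨rfl, hc⟩, if_pos ⟨rfl, rfl⟩]
    · rw [if_neg (by tauto), if_neg (by tauto)]
  · rw [if_neg (by tauto), if_neg (by tauto)]

lemma cell_set2_3 {out : List (List Int)} {R C : Nat} (h : Rect out R C)
    {r1 c1 r2 c2 r3 c3 : Nat} (h1 : r1 < R) (h1' : c1 < C) (h2 : r2 < R) (h2' : c2 < C)
    (h3 : r3 < R) (h3' : c3 < C) (i j : Nat) :
    cellRC (set2 (set2 (set2 out r1 c1) r2 c2) r3 c3) i j =
      if (i = r1 ∧ j = c1) ∨ (i = r2 ∧ j = c2) ∨ (i = r3 ∧ j = c3) then 2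
      else cellRC out i j := by
  have ha := rect_set2 h h1 h1'
  have hb := rect_set2 ha h2 h2'
  rw [cell_set2 hb h3 h3', cell_set2 ha h2 h2', cell_set2 h h1 h1']
  split_ifs <;> tauto

lemma rect_hmark {g out : List (List Int)} {R C : Nat} (h : Rect out R C) {r c : Nat}
    (hr : r < R) (hc : c < C) : Rect (hmarkCells g C out r c) R C := by
  unfold hmarkCells
  split_ifs with h1
  · exact rect_set2 (rect_set2 (rect_set2 h hr hc) hr (by omega)) hr (by omega)
  · exact h

lemma rect_markCells {g out : List (List Int)} {R C : Nat} (h : Rect out R C) {r c : Nat}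
    (hr : r < R) (hc : c < C) : Rect (markCells g R C out r c) R C := by
  have h1 := rect_hmark (g := g) h hr hc
  unfold markCells
  split_ifs with h2
  · exact rect_set2 (rect_set2 (rect_set2 h1 hr hc) (by omega) hc) (by omega) hc
  · exact h1

lemma cell_hmark {g out : List (List Int)} {R C : Nat} (h : Rect out R C) {r c : Nat}
    (hr : r < R) (hc : c < C) (i j : Nat) :
    (Hc g C r c ∧ i = r ∧ (j = c ∨ j = c + 1 ∨ j = c + 2) →
      cellRC (hmarkCells g C out r c) i j = 2) ∧
    (¬ (Hc g C r c ∧ i = r ∧ (j = c ∨ j = c + 1 ∨ j = c + 2)) →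
      cellRC (hmarkCells g C out r c) i j = cellRC out i j) := by
  unfold hmarkCells
  by_cases h1 : Hc g C r c
  · rw [if_pos (by exact h1),
      cell_set2_3 h hr hc hr (by have := h1.1; omega) hr (by have := h1.1; omega)]
    constructor <;> intro hw <;> split_ifs with hp <;> tauto
  · rw [if_neg (by exact h1)]
    exact ⟨fun hw => absurd hw.1 h1, fun _ => rfl⟩

set_option maxHeartbeats 1000000 in
lemma cell_markCells {g out : List (List Int)} {R C : Nat} (h : Rect out R C) {r c : Nat}
    (hr : r < R) (hc : c < C) (i j : Nat) :
    (Writes g R C r c i j → cellRC (markCells g R C out r c) i j = 2) ∧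
    (¬ Writes g R C r c i j → cellRC (markCells g R C out r c) i j = cellRC out i j) := by
  have h1 := rect_hmark (g := g) h hr hc
  have hh := cell_hmark (g := g) h hr hc i j
  simp only [markCells]
  by_cases h2 : Vc g R r c
  · rw [if_pos (by exact h2),
      cell_set2_3 h1 hr hc (by have := h2.1; omega) hc (by have := h2.1; omega) hc]
    unfold Writes
    constructor <;> intro hw <;> split_ifs with hp
    · rfl
    · exact hh.1 (by tauto)
    · exact absurd (Or.inr ⟨h2, by tauto⟩) hw
    · exact hh.2 (by tauto)
  · rw [if_neg (by exact h2)]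
    unfold Writes
    constructor <;> intro hw
    · exact hh.1 (by tauto)
    · exact hh.2 (by tauto)

lemma fold_markCells_char (g : List (List Int)) (R C : Nat) :
    ∀ (L : List (Nat × Nat)), (∀ p ∈ L, p.1 < R ∧ p.2 < C) →
    ∀ (out : List (List Int)), Rect out R C →
    Rect (L.foldl (fun o p => markCells g R C o p.1 p.2) out) R C ∧
    ∀ i j,
      ((∃ p ∈ L, Writes g R C p.1 p.2 i j) →
        cellRC (L.foldl (fun o p => markCells g R C o p.1 p.2) out) i j = 2) ∧
      ((¬ ∃ p ∈ L, Writes g R C p.1 p.2 i j) →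
        cellRC (L.foldl (fun o p => markCells g R C o p.1 p.2) out) i j = cellRC out i j) := by
  intro L
  induction L with
  | nil => intro _ out h; exact ⟨h, fun i j => ⟨fun hw => by simp at hw, fun _ => rfl⟩⟩
  | cons q L ih =>
    intro hmem out h
    have hq := hmem q (by simp)
    have hstep : Rect (markCells g R C out q.1 q.2) R C := rect_markCells h hq.1 hq.2
    obtain ⟨ihr, ihc⟩ := ih (fun p hp => hmem p (by simp [hp])) _ hstep
    refine ⟨by simpa using ihr, fun i j => ⟨?_, ?_⟩⟩
    · intro hw
      simp only [List.foldl_cons]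
      by_cases hL : ∃ p ∈ L, Writes g R C p.1 p.2 i j
      · exact (ihc i j).1 hL
      · rw [(ihc i j).2 hL]
        rcases hw with ⟨p, hp, hpw⟩
        rcases List.mem_cons.1 hp with rfl | hpL
        · exact (cell_markCells h hq.1 hq.2 i j).1 hpw
        · exact absurd ⟨p, hpL, hpw⟩ hL
    · intro hw
      simp only [List.foldl_cons]
      have hL : ¬ ∃ p ∈ L, Writes g R C p.1 p.2 i j := fun ⟨p, hp, hpw⟩ =>
        hw ⟨p, by simp [hp], hpw⟩
      rw [(ihc i j).2 hL]
      exact (cell_markCells h hq.1 hq.2 i j).2 (fun hqw => hw ⟨q, by simp, hqw⟩)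

lemma exists_writes_iff {g : List (List Int)} {R C i j : Nat} (hi : i < R) (hj : j < C) :
    (∃ p ∈ (List.range R).flatMap (fun r => (List.range C).map (fun c => (r, c))),
        Writes g R C p.1 p.2 i j) ↔ (MarkedH g C i j ∨ MarkedV g R i j) := by
  constructor
  · rintro ⟨p, _, hw⟩
    rcases hw with ⟨hc', rfl, hpos⟩ | ⟨hv, rfl, hpos⟩
    · exact Or.inl ⟨p.2, hc', hpos⟩
    · exact Or.inr ⟨p.1, hv, hpos⟩
  · rintro (⟨s, hs, hpos⟩ | ⟨t, ht, hpos⟩)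
    · refine ⟨(i, s), ?_, Or.inl ⟨hs, rfl, hpos⟩⟩
      simp only [List.mem_flatMap, List.mem_map, List.mem_range]
      exact ⟨i, hi, s, by have := hs.1; omega, rfl⟩
    · refine ⟨(t, j), ?_, Or.inr ⟨ht, rfl, hpos⟩⟩
      simp only [List.mem_flatMap, List.mem_map, List.mem_range]
      exact ⟨t, by have := ht.1; omega, j, hj, rfl⟩

lemma solve_char (g : List (List Int)) (R C : Nat) (hg : Rect g R C) (hne : g ≠ []) :
    Rect (solve g) R C ∧
    ∀ i j, i < R → j < C →
      ((MarkedH g C i j ∨ MarkedV g R i j) → cellRC (solve g) i j = 2) ∧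
      (¬ (MarkedH g C i j ∨ MarkedV g R i j) → cellRC (solve g) i j = cellRC g i j) := by
  have hR : g.length = R := hg.1
  have hC : (g.headD []).length = C := by
    cases g with
    | nil => exact absurd rfl hne
    | cons r0 rest => exact hg.2 r0 (by simp)
  have hsolve : solve g =
      ((List.range R).flatMap (fun r => (List.range C).map (fun c => (r, c)))).foldl
        (fun o p => markCells g R C o p.1 p.2) g := by
    simp only [solve, hR, hC, List.map_id']
    rw [List.foldl_flatMap]
    congr 1
    funext out r
    rw [List.foldl_map]
  have hmem : ∀ p ∈ (List.range R).flatMap (fun r => (List.range C).map (fun c => (r, c))),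
      p.1 < R ∧ p.2 < C := by
    intro p hp
    simp only [List.mem_flatMap, List.mem_map, List.mem_range] at hp
    obtain ⟨r, hr, c, hc, rfl⟩ := hp
    exact ⟨hr, hc⟩
  obtain ⟨hrect, hchar⟩ := fold_markCells_char g R C _ hmem g hg
  rw [hsolve]
  refine ⟨hrect, fun i j hi hj => ?_⟩
  have := hchar i j
  rw [exists_writes_iff hi hj] at this
  exact this

-- ---- B side: sweep ----
def SweepInv (p out : List Int) (run : Nat) : Prop :=
  out.length + run = p.length ∧
  (∀ k, k < run → p.getD (out.length + k) 0 = 1) ∧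
  (∀ m, out.length = m + 1 → p.getD m 0 ≠ 1) ∧
  (∀ j, j < out.length →
    (W p j → out.getD j 0 = 2) ∧ (¬ W p j → out.getD j 0 = p.getD j 0))

lemma sweepFlush_length (n : Nat) : (sweepFlush n).length = n := by
  unfold sweepFlush; split <;> simp

lemma sweepFlush_getD {k n : Nat} (h : k < n) :
    (sweepFlush n).getD k 0 = if 3 ≤ n then 2 else 1 := by
  unfold sweepFlush; split <;> exact List.getD_replicate _ h

-- getD over the appended element
lemma getD_append_self (p : List Int) (v : Int) : (p ++ [v]).getD p.length 0 = v := by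
  rw [List.getD_append_right _ _ _ _ (le_refl _)]; simp

-- windows of p ++ [v] seen from inside the already-flushed prefix are windows of p
lemma W_append_of_lt {p out : List Int} {run : Nat} (h : SweepInv p out run) {v : Int} {j : Nat}
    (hj : j < out.length) : W (p ++ [v]) j ↔ W p j := by
  obtain ⟨hlen, hrun, hlast, _⟩ := h
  constructor
  · rintro ⟨s, hslen, h0, h1, h2, hpos⟩
    simp only [List.length_append, List.length_cons, List.length_nil] at hslen
    by_cases hs : s + 2 < p.length
    · exact ⟨s, hs, by rwa [List.getD_append _ _ _ _ (by omega)] at h0,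
        by rwa [List.getD_append _ _ _ _ (by omega)] at h1,
        by rwa [List.getD_append _ _ _ _ (by omega)] at h2, hpos⟩
    · exfalso
      have hs2 : s + 2 = p.length := by omega
      -- the window's first two cells are the last two of p, both ones
      have hp0 : p.getD s 0 = 1 := by rwa [List.getD_append _ _ _ _ (by omega)] at h0
      have hp1 : p.getD (s+1) 0 = 1 := by rwa [List.getD_append _ _ _ _ (by omega)] at h1
      -- so s ≥ out.length (else a flushed boundary cell would be 1), contradicting j < out.length ≤ s ≤ j
      have hso : out.length ≤ s := by
        by_contra hlt
        have hlt2 : s < out.length := by omega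
        rcases Nat.lt_or_ge (s+1) out.length with hlt1 | hge1
        · -- then s+1 ≤ out.length - 1 < out.length: but position out.length-1 is non-1
          have : s + 1 = out.length - 1 ∨ s + 1 < out.length - 1 := by omega
          -- out.length + run = s + 2, s + 1 < out.length → run = 0 and s + 1 = out.length - 1
          have hrun0 : run = 0 := by omega
          have : p.getD (out.length - 1) 0 ≠ 1 := hlast _ (by omega)
          have hseq : s + 1 = out.length - 1 := by omega
          rw [← hseq] at this; exact this hp1
        · -- s + 1 = out.length - ? : s < out.length ≤ s+1 → s = out.length - 1
          have : run ≤ 1 := by omega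
          rcases Nat.lt_or_ge s (out.length - 1) with h' | h'
          · have : p.getD (out.length - 1) 0 = 1 := by
              have : out.length - 1 = s + 1 := by omega
              rw [this]; exact hp1
            exact (hlast _ (by omega)) this
          · have hseq : s = out.length - 1 := by omega
            have hol : 1 ≤ out.length := by omega
            have : p.getD (out.length - 1) 0 ≠ 1 := hlast _ (by omega)
            rw [← hseq] at this; exact this hp0
      omega
  · rintro ⟨s, hs, h0, h1, h2, hpos⟩
    exact ⟨s, by simp; omega, by rwa [List.getD_append _ _ _ _ (by omega)],
      by rwa [List.getD_append _ _ _ _ (by omega)],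
      by rwa [List.getD_append _ _ _ _ (by omega)], hpos⟩

-- a cell inside a maximal all-ones block [a, a+n) bounded on both sides lies in a window iff n ≥ 3
lemma W_of_run {L : List Int} {a n j : Nat} (hlen : a + n ≤ L.length)
    (hones : ∀ k, k < n → L.getD (a + k) 0 = 1) (hj : a ≤ j) (hjn : j < a + n) (hn : 3 ≤ n) :
    W L j := by
  set s0 := min j (a + n - 3) with hs0
  have h1 : a ≤ s0 := by omega
  have h2 : s0 + 2 < a + n := by omega
  have e0 : L.getD s0 0 = 1 := by
    have := hones (s0 - a) (by omega); rwa [show a + (s0 - a) = s0 by omega] at this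
  have e1 : L.getD (s0 + 1) 0 = 1 := by
    have := hones (s0 + 1 - a) (by omega); rwa [show a + (s0 + 1 - a) = s0 + 1 by omega] at this
  have e2 : L.getD (s0 + 2) 0 = 1 := by
    have := hones (s0 + 2 - a) (by omega); rwa [show a + (s0 + 2 - a) = s0 + 2 by omega] at this
  exact ⟨s0, by omega, e0, e1, e2, by omega⟩

-- any cell of a window is 1
lemma W_cell_one {L : List Int} {j : Nat} (h : W L j) : L.getD j 0 = 1 := by
  obtain ⟨s, _, h0, h1, h2, hpos⟩ := h
  rcases hpos with rfl | rfl | rfl <;> assumption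

lemma sweepInv_step {p out : List Int} {run : Nat} (h : SweepInv p out run) (v : Int) :
    SweepInv (p ++ [v]) (sweepStep (out, run) v).1 (sweepStep (out, run) v).2 := by
  obtain ⟨hlen, hrun, hlast, hchar⟩ := h
  by_cases hv : v = 1
  · simp only [sweepStep, if_pos hv]
    refine ⟨by simp; omega, ?_, ?_, ?_⟩
    · intro k hk
      rcases Nat.lt_or_ge k run with hk' | hk'
      · rw [List.getD_append _ _ _ _ (by omega)]
        exact hrun k hk'
      · have hkr : k = run := by omega
        subst hkr
        rw [show out.length + k = p.length by omega, getD_append_self, hv]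
    · intro m hm
      rw [List.getD_append _ _ _ _ (by omega)]
      exact hlast m hm
    · intro j hj
      rw [W_append_of_lt ⟨hlen, hrun, hlast, hchar⟩ hj,
        List.getD_append _ _ _ _ (show j < p.length by omega)]
      exact hchar j hj
  · simp only [sweepStep, if_neg hv]
    rw [List.append_assoc]
    have hflen : (sweepFlush run ++ [v]).length = run + 1 := by simp [sweepFlush_length]
    have holen : (out ++ (sweepFlush run ++ [v])).length = p.length + 1 := by
      simp [sweepFlush_length]; omega
    have hplen : (p ++ [v]).length = p.length + 1 := by simp
    refine ⟨?_, ?_, ?_, ?_⟩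
    · rw [holen, hplen]
    · intro k hk; omega
    · intro m hm
      simp only [List.length_append, sweepFlush_length,
        List.length_cons, List.length_nil] at hm
      have hmp : m = p.length := by omega
      subst hmp
      rw [getD_append_self]; exact hv
    · intro j hj
      simp only [List.length_append, sweepFlush_length,
        List.length_cons, List.length_nil] at hj
      have hone : ∀ k, k < run → (p ++ [v]).getD (out.length + k) 0 = 1 := by
        intro k hk
        rw [List.getD_append _ _ _ _ (by omega)]
        exact hrun k hk
      rcases Nat.lt_or_ge j out.length with hj1 | hj1
      · -- inside the already-flushed prefix
        rw [List.getD_append _ _ _ _ (by omega)]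
        have hW := W_append_of_lt ⟨hlen, hrun, hlast, hchar⟩ (v := v) hj1
        have := hchar j hj1
        constructor
        · intro hw; exact this.1 (hW.1 hw)
        · intro hw
          rw [this.2 (fun hw' => hw (hW.2 hw')),
            List.getD_append _ _ _ _ (by omega)]
      · rcases Nat.lt_or_ge j (out.length + run) with hj2 | hj2
        · -- inside the run being flushed now
          have hval : (out ++ (sweepFlush run ++ [v])).getD j 0 = if 3 ≤ run then 2 else 1 := by
            rw [List.getD_append_right _ _ _ _ (by omega),
              List.getD_append _ _ _ _ (by rw [sweepFlush_length]; omega),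
              sweepFlush_getD (by omega)]
          have hpj : (p ++ [v]).getD j 0 = 1 := by
            have := hone (j - out.length) (by omega)
            rwa [show out.length + (j - out.length) = j by omega] at this
          constructor
          · intro hw
            obtain ⟨s, hslen, h0, h1, h2, hpos⟩ := hw
            -- the window must sit inside the current run, so run ≥ 3
            have hso : out.length ≤ s := by
              by_contra hso
              have hs1 : s < out.length := by omega
              have hcov : out.length - 1 = s ∨ out.length - 1 = s + 1 ∨ out.length - 1 = s + 2 := by
                omega
              have hnm : (p ++ [v]).getD (out.length - 1) 0 ≠ 1 := by
                rw [List.getD_append _ _ _ _ (by omega)]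
                exact hlast _ (by omega)
              rcases hcov with he | he | he <;> rw [he] at hnm <;> tauto
            have hs2 : s + 2 < p.length := by
              rcases Nat.lt_or_ge (s+2) p.length with h' | h'
              · exact h'
              · exfalso
                have : s + 2 = p.length := by rw [hplen] at hslen; omega
                rw [this, getD_append_self] at h2
                exact hv h2
            have hr3 : 3 ≤ run := by omega
            rw [hval, if_pos hr3]
          · intro hw
            rcases Nat.lt_or_ge run 3 with hr | hr
            · rw [hval, if_neg (by omega), hpj]
            · exact absurd (W_of_run (by omega) hone hj1 (by omega) hr) hw
        · -- the cell holding v itself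
          have hjp : j = p.length := by omega
          have hval : (out ++ (sweepFlush run ++ [v])).getD j 0 = v := by
            rw [List.getD_append_right _ _ _ _ (by omega),
              List.getD_append_right _ _ _ _ (by rw [sweepFlush_length]; omega),
              sweepFlush_length]
            simp [show j - out.length - run = 0 by omega]
          constructor
          · intro hw
            have := W_cell_one hw
            rw [hjp, getD_append_self] at this
            exact absurd this hv
          · intro _
            rw [hval, hjp, getD_append_self]

lemma sweepInv_fold (rest : List Int) :
    ∀ (p out : List Int) (run : Nat), SweepInv p out run →
    SweepInv (p ++ rest) (rest.foldl sweepStep (out, run)).1 (rest.foldl sweepStep (out, run)).2 := by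
  induction rest with
  | nil => intro p out run h; simpa using h
  | cons v rest ih =>
    intro p out run h
    have h2 := sweepInv_step h v
    have := ih (p ++ [v]) _ _ h2
    simpa [List.foldl_cons] using this

lemma sweep_spec (L : List Int) :
    (sweep L).length = L.length ∧
    ∀ j, j < L.length →
      (W L j → (sweep L).getD j 0 = 2) ∧ (¬ W L j → (sweep L).getD j 0 = L.getD j 0) := by
  have hinv0 : SweepInv [] [] 0 := by
    refine ⟨rfl, by intro k hk; omega, by simp, by intro j hj; simp at hj⟩
  have hinv := sweepInv_fold L [] [] 0 hinv0
  simp only [List.nil_append] at hinv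
  obtain ⟨hlen, hrun, hlast, hchar⟩ := hinv
  set st := L.foldl sweepStep ([], 0) with hst
  have hsw : sweep L = st.1 ++ sweepFlush st.2 := rfl
  constructor
  · rw [hsw]; simp [sweepFlush_length]; omega
  · intro j hj
    rcases Nat.lt_or_ge j st.1.length with hj1 | hj1
    · rw [hsw, List.getD_append _ _ _ _ (by omega)]
      exact hchar j hj1
    · have hval : (sweep L).getD j 0 = if 3 ≤ st.2 then 2 else 1 := by
        rw [hsw, List.getD_append_right _ _ _ _ (by omega), sweepFlush_getD (by omega)]
      have hLj : L.getD j 0 = 1 := by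
        have := hrun (j - st.1.length) (by omega)
        rwa [show st.1.length + (j - st.1.length) = j by omega] at this
      constructor
      · intro hw
        obtain ⟨s, hslen, h0, h1, h2, hpos⟩ := hw
        have hso : st.1.length ≤ s := by
          by_contra hso
          have hs1 : s < st.1.length := by omega
          have hcov : st.1.length - 1 = s ∨ st.1.length - 1 = s + 1 ∨ st.1.length - 1 = s + 2 := by
            omega
          have hnm : L.getD (st.1.length - 1) 0 ≠ 1 := hlast _ (by omega)
          rcases hcov with he | he | he <;> rw [he] at hnm <;> tauto
        have hr3 : 3 ≤ st.2 := by omega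
        rw [hval, if_pos hr3]
      · intro hw
        rcases Nat.lt_or_ge st.2 3 with hr | hr
        · rw [hval, if_neg (by omega), hLj]
        · exact absurd (W_of_run (by omega) hrun hj1 (by omega) hr) hw

-- ---- B side: zip ----
lemma splitHeads_spec : ∀ (g : List (List Int)), (∀ row ∈ g, row ≠ []) →
    splitHeads g = some (g.map (fun row => row.headD 0), g.map List.tail) := by
  intro g
  induction g with
  | nil => intro _; rfl
  | cons row rs ih =>
    intro hne
    cases row with
    | nil => exact absurd rfl (hne [] (by simp))
    | cons h t =>
      simp only [splitHeads, ih (fun r hr => hne r (by simp [hr]))]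
      simp

lemma zipGo_spec : ∀ (C : Nat) (g : List (List Int)) (R : Nat), Rect g R C →
    Rect (zipGo C g) C R ∧
    ∀ c r, c < C → r < R → cellRC (zipGo C g) c r = cellRC g r c := by
  intro C
  induction C with
  | zero =>
    intro g R _
    exact ⟨⟨rfl, by simp [zipGo]⟩, fun c r hc _ => by omega⟩
  | succ C ih =>
    intro g R hg
    obtain ⟨hlen, hrow⟩ := hg
    have hne : ∀ row ∈ g, row ≠ [] := by
      intro row hr h0; have := hrow row hr; rw [h0] at this; simp at this
    have hts : Rect (g.map List.tail) R C := by
      refine ⟨by simp [hlen], ?_⟩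
      intro row' hr'
      obtain ⟨row, hr, rfl⟩ := List.mem_map.1 hr'
      rw [List.length_tail, hrow row hr]
      omega
    obtain ⟨⟨ihl, ihrow⟩, ihc⟩ := ih (g.map List.tail) R hts
    have hzip : zipGo (C+1) g =
        (g.map (fun row => row.headD 0)) :: zipGo C (g.map List.tail) := by
      simp only [zipGo, splitHeads_spec g hne]
    rw [hzip]
    refine ⟨⟨by simp [ihl], ?_⟩, ?_⟩
    · intro col hcol
      rcases List.mem_cons.1 hcol with rfl | hcol'
      · simp [hlen]
      · exact ihrow col hcol'
    · intro c r hc hr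
      have hrlen : r < g.length := by omega
      have hrownn : g[r] ≠ [] := hne _ (by exact List.getElem_mem hrlen)
      have hgr : g.getD r [] = g[r] := List.getD_eq_getElem g [] hrlen
      cases c with
      | zero =>
        unfold cellRC
        rw [List.getD_cons_zero]
        have : (g.map (fun row => row.headD 0)).getD r 0 = g[r].headD 0 := by
          rw [List.getD_eq_getElem _ _ (by simp [hlen]; omega), List.getElem_map]
        rw [this, hgr]
        cases hx : g[r] with
        | nil => exact absurd hx hrownn
        | cons a l => simp
      | succ c =>
        unfold cellRC
        rw [List.getD_cons_succ]
        have := ihc c r (by omega) hr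
        unfold cellRC at this
        rw [this]
        have : (g.map List.tail).getD r [] = g[r].tail := by
          rw [List.getD_eq_getElem _ _ (by simp [hlen]; omega), List.getElem_map]
        rw [this, hgr]
        cases hx : g[r] with
        | nil => exact absurd hx hrownn
        | cons a l => simp

lemma pyZip_spec {g : List (List Int)} {R C : Nat} (hg : Rect g R C) (hne : g ≠ []) :
    Rect (pyZip g) C R ∧ ∀ c r, c < C → r < R → cellRC (pyZip g) c r = cellRC g r c := by
  cases g with
  | nil => exact absurd rfl hne
  | cons r0 rest =>
    have h0 : r0.length = C := hg.2 r0 (by simp)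
    have : pyZip (r0 :: rest) = zipGo C (r0 :: rest) := by
      simp only [pyZip, h0]
    rw [this]
    exact zipGo_spec C (r0 :: rest) R hg

-- ---- B side: generic facts about the write folds ----
lemma foldl_const {alpha beta : Type} (l : List alpha) (b : beta) :
    l.foldl (fun o _ => o) b = b := by
  induction l generalizing b with
  | nil => rfl
  | cons x l ih => simpa using ih b

lemma map_id_of_mem {alpha : Type} (l : List alpha) (f : alpha → alpha)
    (h : ∀ x ∈ l, f x = x) : l.map f = l := by
  rw [List.map_congr_left h]; exact List.map_id l

lemma set2_noop {g : List (List Int)} {r c : Nat} (h : cellRC g r c = 2) :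
    set2 g r c = g := by
  unfold cellRC at h
  unfold set2
  by_cases hr : r < g.length
  · have hrow : g.getD r [] = g[r] := List.getD_eq_getElem g [] hr
    by_cases hc : c < (g.getD r []).length
    · rw [List.getD_eq_getElem _ _ hc] at h
      rw [← h, List.set_getElem_self, hrow, List.set_getElem_self]
    · rw [List.set_eq_of_length_le (Nat.le_of_not_lt hc), hrow, List.set_getElem_self]
  · rw [List.set_eq_of_length_le (l := g) (Nat.le_of_not_lt hr)]

-- the inner write loop, characterised over an arbitrary list of row indices
lemma foldcol_char {R C : Nat} (c : Nat) (hc : c < C) (marked : List Int) :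
    ∀ (L : List Nat), (∀ r ∈ L, r < R) → ∀ out, Rect out R C →
    Rect (L.foldl (fun o r => if marked.getD r 0 = 2 then set2 o r c else o) out) R C ∧
    ∀ i j,
      ((i ∈ L ∧ marked.getD i 0 = 2 ∧ j = c) →
        cellRC (L.foldl (fun o r => if marked.getD r 0 = 2 then set2 o r c else o) out) i j = 2) ∧
      (¬ (i ∈ L ∧ marked.getD i 0 = 2 ∧ j = c) →
        cellRC (L.foldl (fun o r => if marked.getD r 0 = 2 then set2 o r c else o) out) i j
          = cellRC out i j) := by
  intro L
  induction L with
  | nil => intro _ out h; exact ⟨h, fun i j => ⟨fun hw => by simp at hw, fun _ => rfl⟩⟩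
  | cons q L ih =>
    intro hmem out h
    have hq : q < R := hmem q (by simp)
    have hstep : Rect (if marked.getD q 0 = 2 then set2 out q c else out) R C := by
      split_ifs
      · exact rect_set2 h hq hc
      · exact h
    obtain ⟨ihr, ihc⟩ := ih (fun r hr => hmem r (by simp [hr])) _ hstep
    have hstepcell : ∀ i j,
        cellRC (if marked.getD q 0 = 2 then set2 out q c else out) i j =
          if (i = q ∧ marked.getD i 0 = 2 ∧ j = c) then 2 else cellRC out i j := by
      intro i j
      split_ifs with h1 h2 h2
      · rw [cell_set2 h hq hc]
        rw [if_pos ⟨h2.1, h2.2.2⟩]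
      · rw [cell_set2 h hq hc]
        rw [if_neg (fun hp => h2 ⟨hp.1, by rw [hp.1]; exact h1, hp.2⟩)]
      · exact absurd (by rw [h2.1] at h2; exact h2.2.1) h1
      · rfl
    refine ⟨by simpa using ihr, fun i j => ⟨?_, ?_⟩⟩
    · intro hw
      simp only [List.foldl_cons]
      by_cases hL : i ∈ L ∧ marked.getD i 0 = 2 ∧ j = c
      · exact (ihc i j).1 hL
      · rw [(ihc i j).2 hL, hstepcell]
        rcases hw with ⟨hmem', hm, hj⟩
        rcases List.mem_cons.1 hmem' with rfl | hiL
        · rw [if_pos ⟨rfl, hm, hj⟩]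
        · exact absurd ⟨hiL, hm, hj⟩ hL
    · intro hw
      simp only [List.foldl_cons]
      have hL : ¬ (i ∈ L ∧ marked.getD i 0 = 2 ∧ j = c) :=
        fun ⟨hiL, hm, hj⟩ => hw ⟨by simp [hiL], hm, hj⟩
      rw [(ihc i j).2 hL, hstepcell,
        if_neg (fun ⟨hiq, hm, hj⟩ => hw ⟨by simp [hiq], hm, hj⟩)]

lemma markCol_char {R C : Nat} (p : Int × List Int)
    (hp : ∃ c : Nat, p.1 = (c : Int) ∧ c < C ∧ p.2.length = R)
    (out : List (List Int)) (h : Rect out R C) :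
    Rect (markCol out p) R C ∧
    ∀ i j, i < R → j < C →
      ((p.1 = (j : Int) ∧ (sweep p.2).getD i 0 = 2) → cellRC (markCol out p) i j = 2) ∧
      (¬ (p.1 = (j : Int) ∧ (sweep p.2).getD i 0 = 2) →
        cellRC (markCol out p) i j = cellRC out i j) := by
  obtain ⟨c, hpc, hcC, hplen⟩ := hp
  have hslen : (sweep p.2).length = R := by rw [(sweep_spec _).1, hplen]
  have htn : p.1.toNat = c := by rw [hpc]; simp
  simp only [markCol, htn]
  obtain ⟨hr, hcell⟩ := foldcol_char c hcC (sweep p.2) (List.range (sweep p.2).length)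
    (fun r hr => by rw [hslen] at hr; exact List.mem_range.1 hr) out h
  refine ⟨hr, fun i j hi hj => ?_⟩
  have hiff : (i ∈ List.range (sweep p.2).length ∧ (sweep p.2).getD i 0 = 2 ∧ j = c) ↔
      (p.1 = (j : Int) ∧ (sweep p.2).getD i 0 = 2) := by
    constructor
    · rintro ⟨_, hm, rfl⟩; exact ⟨hpc, hm⟩
    · rintro ⟨hj1, hm⟩
      have : (j : Int) = (c : Int) := by rw [← hj1, hpc]
      have hjc : j = c := by exact_mod_cast this
      exact ⟨by rw [List.mem_range, hslen]; omega, hm, hjc⟩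
  constructor
  · intro hw; exact (hcell i j).1 (hiff.2 hw)
  · intro hw; exact (hcell i j).2 (fun h' => hw (hiff.1 h'))

lemma foldB_char {R C : Nat} :
    ∀ (K : List (Int × List Int)),
      (∀ p ∈ K, ∃ c : Nat, p.1 = (c : Int) ∧ c < C ∧ p.2.length = R) →
    ∀ out, Rect out R C →
    Rect (K.foldl markCol out) R C ∧
    ∀ i j, i < R → j < C →
      ((∃ p ∈ K, p.1 = (j : Int) ∧ (sweep p.2).getD i 0 = 2) →
        cellRC (K.foldl markCol out) i j = 2) ∧
      ((¬ ∃ p ∈ K, p.1 = (j : Int) ∧ (sweep p.2).getD i 0 = 2) →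
        cellRC (K.foldl markCol out) i j = cellRC out i j) := by
  intro K
  induction K with
  | nil => intro _ out h; exact ⟨h, fun i j _ _ => ⟨fun hw => by simp at hw, fun _ => rfl⟩⟩
  | cons q K ih =>
    intro hmem out h
    obtain ⟨hstep, hstepcell⟩ := markCol_char q (hmem q (by simp)) out h
    obtain ⟨ihr, ihc⟩ := ih (fun p hp => hmem p (by simp [hp])) _ hstep
    refine ⟨by simpa using ihr, fun i j hi hj => ⟨?_, ?_⟩⟩
    · intro hw
      simp only [List.foldl_cons]
      by_cases hL : ∃ p ∈ K, p.1 = (j : Int) ∧ (sweep p.2).getD i 0 = 2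
      · exact (ihc i j hi hj).1 hL
      · rw [(ihc i j hi hj).2 hL]
        rcases hw with ⟨p, hp, hpw⟩
        rcases List.mem_cons.1 hp with rfl | hpK
        · exact (hstepcell i j hi hj).1 hpw
        · exact absurd ⟨p, hpK, hpw⟩ hL
    · intro hw
      simp only [List.foldl_cons]
      have hL : ¬ ∃ p ∈ K, p.1 = (j : Int) ∧ (sweep p.2).getD i 0 = 2 :=
        fun ⟨p, hp, hpw⟩ => hw ⟨p, by simp [hp], hpw⟩
      rw [(ihc i j hi hj).2 hL]
      exact (hstepcell i j hi hj).2 (fun h' => hw ⟨q, by simp, h'⟩)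

lemma solve_alt_char (g : List (List Int)) (R C : Nat) (hg : Rect g R C) (hne : g ≠ []) :
    Rect (solve_alt g) R C ∧
    ∀ i j, i < R → j < C →
      ((MarkedH g C i j ∨ MarkedV g R i j) → cellRC (solve_alt g) i j = 2) ∧
      (¬ (MarkedH g C i j ∨ MarkedV g R i j) → cellRC (solve_alt g) i j = cellRC g i j) := by
  obtain ⟨hlen, hrowlen⟩ := hg
  obtain ⟨⟨hzl, hzrow⟩, hzc⟩ := pyZip_spec ⟨hlen, hrowlen⟩ hne
  have hrow_g : ∀ i, i < R → (g.getD i []).length = C := by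
    intro i hi
    rw [List.getD_eq_getElem g [] (by omega)]
    exact hrowlen _ (List.getElem_mem (by omega))
  have hout : Rect (g.map sweep) R C := by
    refine ⟨by simp [hlen], ?_⟩
    intro row hrow
    obtain ⟨row', hr', rfl⟩ := List.mem_map.1 hrow
    rw [(sweep_spec _).1]; exact hrowlen _ hr'
  have hK : ∀ p ∈ PySem.List.enumerate (pyZip g) 0,
      ∃ c : Nat, p.1 = (c : Int) ∧ c < C ∧ p.2.length = R := by
    intro p hp
    obtain ⟨k, hk, rfl⟩ := (PySem.List.mem_enumerate_iff _ _ _).1 hp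
    refine ⟨k, by simp, by omega, hzrow _ (List.getElem_mem hk)⟩
  have hsolve : solve_alt g = (PySem.List.enumerate (pyZip g) 0).foldl markCol (g.map sweep) :=
    rfl
  obtain ⟨hr, hcell⟩ := foldB_char _ hK (g.map sweep) hout
  rw [hsolve]
  refine ⟨hr, fun i j hi hj => ?_⟩
  have hmapcell : cellRC (g.map sweep) i j = (sweep (g.getD i [])).getD j 0 := by
    unfold cellRC
    rw [List.getD_eq_getElem (g.map sweep) [] (by simp [hlen]; omega), List.getElem_map,
      List.getD_eq_getElem g [] (by omega)]
  have hcolj : (pyZip g)[j]'(by omega) = (pyZip g).getD j [] :=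
    (List.getD_eq_getElem _ _ (by omega)).symm
  have hex : (∃ p ∈ PySem.List.enumerate (pyZip g) 0,
      p.1 = (j : Int) ∧ (sweep p.2).getD i 0 = 2) ↔
      (sweep ((pyZip g).getD j [])).getD i 0 = 2 := by
    constructor
    · rintro ⟨p, hp, hp1, hp2⟩
      obtain ⟨k, hk, rfl⟩ := (PySem.List.mem_enumerate_iff _ _ _).1 hp
      simp only [zero_add] at hp1
      have hkj : k = j := by exact_mod_cast hp1
      subst hkj
      rwa [hcolj] at hp2
    · intro hm
      refine ⟨((j : Int), (pyZip g)[j]'(by omega)), ?_, by simp, by rwa [hcolj]⟩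
      rw [PySem.List.mem_enumerate_iff]
      exact ⟨j, by omega, by simp⟩
  -- the per-cell value of B
  have hval : cellRC (solve_alt g) i j =
      (if (sweep ((pyZip g).getD j [])).getD i 0 = 2 then 2
       else (sweep (g.getD i [])).getD j 0) := by
    rw [hsolve]
    split_ifs with hm
    · exact (hcell i j hi hj).1 (hex.2 hm)
    · rw [(hcell i j hi hj).2 (fun h' => hm (hex.1 h')), hmapcell]
  rw [← hsolve, hval]
  have hcollen : ((pyZip g).getD j []).length = R := by
    rw [List.getD_eq_getElem _ _ (by omega)]
    exact hzrow _ (List.getElem_mem (by omega))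
  -- characterisations of the two sweeps
  have hWrow : W (g.getD i []) j ↔ MarkedH g C i j := by
    unfold W MarkedH Hc cellRC
    rw [hrow_g i hi]
    constructor
    · rintro ⟨t, h1, h2, h3, h4, h5⟩; exact ⟨t, ⟨h1, h2, h3, h4⟩, h5⟩
    · rintro ⟨t, ⟨h1, h2, h3, h4⟩, h5⟩; exact ⟨t, h1, h2, h3, h4, h5⟩
  have hzc' : ∀ t, t < R → ((pyZip g).getD j []).getD t 0 = cellRC g t j :=
    fun t ht => hzc j t hj ht
  have hWcol : W ((pyZip g).getD j []) i ↔ MarkedV g R i j := by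
    unfold W MarkedV Vc
    rw [hcollen]
    constructor
    · rintro ⟨t, ht, h0, h1, h2, hpos⟩
      refine ⟨t, ⟨ht, ?_, ?_, ?_⟩, hpos⟩
      · rw [← hzc' t (by omega)]; exact h0
      · rw [← hzc' (t+1) (by omega)]; exact h1
      · rw [← hzc' (t+2) (by omega)]; exact h2
    · rintro ⟨t, ⟨ht, h0, h1, h2⟩, hpos⟩
      refine ⟨t, ht, ?_, ?_, ?_, hpos⟩
      · rw [hzc' t (by omega)]; exact h0
      · rw [hzc' (t+1) (by omega)]; exact h1
      · rw [hzc' (t+2) (by omega)]; exact h2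
  have hrowchar := (sweep_spec (g.getD i [])).2 j (by have := hrow_g i hi; omega)
  have hcolchar := (sweep_spec ((pyZip g).getD j [])).2 i (by omega)
  have hgij : ((pyZip g).getD j []).getD i 0 = cellRC g i j := hzc' i hi
  constructor
  · rintro (hH | hV)
    · by_cases hV' : MarkedV g R i j
      · rw [if_pos (by rw [hcolchar.1 (hWcol.2 hV')])]
      · split_ifs with h2
        · rfl
        · exact hrowchar.1 (hWrow.2 hH)
    · rw [if_pos (by rw [hcolchar.1 (hWcol.2 hV)])]
  · intro hw
    have hnH : ¬ MarkedH g C i j := fun h' => hw (Or.inl h')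
    have hnV : ¬ MarkedV g R i j := fun h' => hw (Or.inr h')
    have hcv : (sweep ((pyZip g).getD j [])).getD i 0 = cellRC g i j := by
      rw [hcolchar.2 (fun h' => hnV (hWcol.1 h')), hgij]
    by_cases h2 : cellRC g i j = 2
    · rw [if_pos (by rw [hcv, h2]), h2]
    · rw [if_neg (by rw [hcv]; exact h2)]
      rw [hrowchar.2 (fun h' => hnH (hWrow.1 h'))]
      unfold cellRC
      rfl

-- ---- the two ragged no-op branches of Pre_ ----
lemma sweep_id {L : List Int} (h : ∀ j, j < L.length → ¬ W L j) : sweep L = L := by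
  obtain ⟨hl, hc⟩ := sweep_spec L
  apply List.ext_getElem (by omega)
  intro j h1 h2
  rw [← List.getD_eq_getElem _ 0 h1, ← List.getD_eq_getElem _ 0 h2]
  exact (hc j (by omega)).2 (h j (by omega))

lemma sweep_short {L : List Int} (h : L.length ≤ 2) : sweep L = L :=
  sweep_id (fun _ _ hw => by obtain ⟨s, hs, _⟩ := hw; omega)

lemma sweep_noRun3 {L : List Int} (h : NoRun3 L) : sweep L = L :=
  sweep_id (fun _ _ hw => by
    obtain ⟨s, hs, h1, h2, h3, _⟩ := hw
    exact h s (by omega) ⟨hs, h1, h2, h3⟩)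

lemma map_sweep_id {g : List (List Int)} (h : ∀ row ∈ g, NoRun3 row) : g.map sweep = g :=
  map_id_of_mem g sweep (fun row hr => sweep_noRun3 (h row hr))

lemma splitHeads_some : ∀ (g : List (List Int)) (x : List Int × List (List Int)),
    splitHeads g = some x →
    (∀ row ∈ g, row ≠ []) ∧ x.1 = g.map (fun row => row.headD 0) ∧ x.2 = g.map List.tail := by
  intro g
  induction g with
  | nil =>
    intro x hx
    simp only [splitHeads] at hx
    cases hx
    exact ⟨by simp, rfl, rfl⟩
  | cons row rs ih =>
    intro x hx
    cases row with
    | nil => simp [splitHeads] at hx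
    | cons h t =>
      simp only [splitHeads] at hx
      cases hsp : splitHeads rs with
      | none => rw [hsp] at hx; simp at hx
      | some y =>
        rw [hsp] at hx
        obtain ⟨hne, h1, h2⟩ := ih y hsp
        cases hx
        refine ⟨?_, by simp [h1], by simp [h2]⟩
        intro r hr
        rcases List.mem_cons.1 hr with rfl | hr'
        · simp
        · exact hne r hr'

lemma zipGo_cols : ∀ (n : Nat) (g : List (List Int)),
    (∀ col ∈ zipGo n g, col.length = g.length) ∧
    (∀ c, c < (zipGo n g).length → ∀ r, r < g.length →
      ((zipGo n g).getD c []).getD r 0 = (g.getD r []).getD c 0) := by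
  intro n
  induction n with
  | zero => intro g; simp [zipGo]
  | succ n ih =>
    intro g
    cases hsp : splitHeads g with
    | none => simp [zipGo, hsp]
    | some x =>
      obtain ⟨hne, h1, h2⟩ := splitHeads_some g x hsp
      obtain ⟨ihl, ihc⟩ := ih (g.map List.tail)
      have hzg : zipGo (n+1) g = x.1 :: zipGo n (g.map List.tail) := by
        simp only [zipGo, hsp]
        rw [← h2]
      rw [hzg]
      constructor
      · intro col hcol
        rcases List.mem_cons.1 hcol with rfl | hcol'
        · simp [h1]
        · rw [ihl col hcol', List.length_map]
      · intro c hcl r hr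
        have hrownn : g[r]'(by omega) ≠ [] := hne _ (List.getElem_mem (by omega))
        have hgr : g.getD r [] = g[r]'(by omega) := List.getD_eq_getElem g [] (by omega)
        cases c with
        | zero =>
          rw [List.getD_cons_zero, h1]
          have : (g.map (fun row => row.headD 0)).getD r 0 = (g[r]'(by omega)).headD 0 := by
            rw [List.getD_eq_getElem _ _ (by simp; omega), List.getElem_map]
          rw [this, hgr]
          cases hx : g[r]'(by omega) with
          | nil => exact absurd hx hrownn
          | cons a l => simp
        | succ c =>
          rw [List.getD_cons_succ]
          simp only [List.length_cons] at hcl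
          rw [ihc c (by omega) r (by simp; omega)]
          have : (g.map List.tail).getD r [] = (g[r]'(by omega)).tail := by
            rw [List.getD_eq_getElem _ _ (by simp; omega), List.getElem_map]
          rw [this, hgr]
          cases hx : g[r]'(by omega) with
          | nil => exact absurd hx hrownn
          | cons a l => simp

lemma pyZip_cols (g : List (List Int)) :
    (∀ col ∈ pyZip g, col.length = g.length) ∧
    (∀ c, c < (pyZip g).length → ∀ r, r < g.length →
      ((pyZip g).getD c []).getD r 0 = (g.getD r []).getD c 0) := by
  cases g with
  | nil => simp [pyZip]
  | cons r0 rest => exact zipGo_cols r0.length (r0 :: rest)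

lemma pyZip_nil {g : List (List Int)} (h : (g.headD []).length = 0) : pyZip g = [] := by
  cases g with
  | nil => rfl
  | cons r0 rest =>
    simp only [pyZip]
    rw [show r0.length = 0 from h]
    rfl

lemma markCol_noop {g : List (List Int)} (p : Int × List Int)
    (h : ∀ r, r < (sweep p.2).length → (sweep p.2).getD r 0 = 2 → set2 g r p.1.toNat = g) :
    markCol g p = g := by
  simp only [markCol]
  suffices h' : ∀ L : List Nat, (∀ r ∈ L, r < (sweep p.2).length) →
      L.foldl (fun o r => if (sweep p.2).getD r 0 = 2 then set2 o r p.1.toNat else o) g = g by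
    exact h' _ (fun r hr => List.mem_range.1 hr)
  intro L hL
  induction L with
  | nil => rfl
  | cons q L ih =>
    simp only [List.foldl_cons]
    have hq := hL q (by simp)
    split_ifs with hcond
    · rw [h q hq hcond]
      exact ih (fun r hr => hL r (by simp [hr]))
    · exact ih (fun r hr => hL r (by simp [hr]))

lemma foldB_noop {g : List (List Int)} :
    ∀ (K : List (Int × List Int)), (∀ p ∈ K, markCol g p = g) → K.foldl markCol g = g := by
  intro K
  induction K with
  | nil => intro _; rfl
  | cons q K ih =>
    intro h
    simp only [List.foldl_cons, h q (by simp)]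
    exact ih (fun p hp => h p (by simp [hp]))

lemma alt_id {g : List (List Int)} (hrows : ∀ row ∈ g, NoRun3 row)
    (hsz : g.length ≤ 2 ∨ pyZip g = []) : solve_alt g = g := by
  have hout : g.map sweep = g := map_sweep_id hrows
  show (PySem.List.enumerate (pyZip g) 0).foldl markCol (g.map sweep) = g
  rw [hout]
  rcases hsz with hs | hz
  · apply foldB_noop
    intro p hp
    obtain ⟨k, hk, rfl⟩ := (PySem.List.mem_enumerate_iff _ _ _).1 hp
    obtain ⟨hclen, hcent⟩ := pyZip_cols g
    have hcl : ((pyZip g)[k]'hk).length = g.length := hclen _ (List.getElem_mem hk)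
    have hsw : sweep ((pyZip g)[k]'hk) = (pyZip g)[k]'hk := sweep_short (by omega)
    apply markCol_noop
    intro r hr hcond
    simp only at hr hcond ⊢
    rw [hsw] at hr hcond
    have hrg : r < g.length := by omega
    have htn : ((0 : Int) + (k : Int)).toNat = k := by simp
    rw [htn]
    have hent : ((pyZip g).getD k []).getD r 0 = (g.getD r []).getD k 0 :=
      hcent k (by omega) r hrg
    have hcolD : (pyZip g).getD k [] = (pyZip g)[k]'hk := List.getD_eq_getElem _ _ hk
    rw [hcolD] at hent
    apply set2_noop
    show (g.getD r []).getD k 0 = 2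
    rw [← hent]
    exact hcond
  · rw [hz]
    simp [PySem.List.enumerate_nil]

lemma markCells_small {g : List (List Int)} {rows cols : Nat} (h1 : rows ≤ 2) (h2 : cols ≤ 2)
    (out : List (List Int)) (r c : Nat) : markCells g rows cols out r c = out := by
  simp only [markCells]
  rw [if_neg (fun h => absurd h.1 (by omega))]
  simp only [hmarkCells]
  rw [if_neg (fun h => absurd h.1 (by omega))]

lemma solve_small {g : List (List Int)} (h1 : g.length ≤ 2)
    (h2 : (g.headD []).length ≤ 2) : solve g = g := by
  simp only [solve, markCells_small h1 h2, foldl_const, List.map_id']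

lemma solve_zero {g : List (List Int)} (h : (g.headD []).length = 0) : solve g = g := by
  simp only [solve, h, List.range_zero, List.foldl_nil, foldl_const, List.map_id']

lemma getElem_cell (X : List (List Int)) (i j : Nat) (hi : i < X.length)
    (hj : j < (X[i]'hi).length) : (X[i]'hi)[j]'hj = cellRC X i j := by
  unfold cellRC
  rw [List.getD_eq_getElem X [] hi, List.getD_eq_getElem _ _ hj]

-- ===== VERDICT (by name: the statement is the Claim_ definition above) =====
theorem solve_spec : Claim_equal_solve := by
  intro g _hdom hpre
  unfold Spec_solve
  obtain ⟨hne, hdisj⟩ := hpre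
  rcases hdisj with hrect | ⟨hR2, hC2, hnr⟩ | ⟨hC0, hnr⟩
  · set R := g.length with hR
    set C := (g.headD []).length with hC
    have hg : Rect g R C := ⟨rfl, hrect⟩
    obtain ⟨⟨hla, hra⟩, hcharA⟩ := solve_char g R C hg hne
    obtain ⟨⟨hlb, hrb⟩, hcharB⟩ := solve_alt_char g R C hg hne
    apply List.ext_getElem (by omega)
    intro i hi hi'
    apply List.ext_getElem
    · rw [hra _ (List.getElem_mem hi), hrb _ (List.getElem_mem hi')]
    · intro j hj hj'
      have hiR : i < R := by omega
      have hjC : j < C := by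
        rw [hra _ (List.getElem_mem hi)] at hj; omega
      rw [getElem_cell (solve g) i j (by omega) hj,
        getElem_cell (solve_alt g) i j (by omega) hj']
      by_cases hm : MarkedH g C i j ∨ MarkedV g R i j
      · rw [(hcharA i j hiR hjC).1 hm, (hcharB i j hiR hjC).1 hm]
      · rw [(hcharA i j hiR hjC).2 hm, (hcharB i j hiR hjC).2 hm]
  · rw [solve_small hR2 hC2, alt_id hnr (Or.inl hR2)]
  · rw [solve_zero hC0, alt_id hnr (Or.inr (pyZip_nil hC0))]
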